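-- pv_equiv track=rewrite | github.com/pypi-data/pypi-mirror-342 | packages/alpha-parser/alpha_parser-0.1.2-py3-none-any.whl/alpha_parser/alpha_parser.py | ts_rank
-- ===== SOURCE A (Python) =====
-- from typing import List, Optional, Union, Dict, Any
--
-- def ts_rank(data: List[float], window: int) -> List[float]:
--     """
--     시계열 데이터의 이동 순위를 계산한다.
--     현재 값을 포함한 최근 window일의 순위를 계산
--     예: ts_rank([1, 2, 3], 2) -> [1, 2, 2]
--     """
--     if not isinstance(data, list):
--         data = [data]
--     if not isinstance(window, (int, float)):
--         raise ValueError("Window must be a number")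
--     window = int(window) + 1  # 현재 값을 포함하기 위해 window + 1
--     if window <= 0:
--         raise ValueError("Window must be positive")
--     result = []
--     for i in range(len(data)):
--         start = max(0, i - window + 1)
--         window_data = data[start:i + 1]
--         sorted_data = sorted(window_data)
--         rank = sorted_data.index(data[i]) + 1
--         result.append(rank)
--     return result
-- ===== SOURCE B (Python) =====
-- def ts_rank(data, window):
--     if not isinstance(data, list):
--         data = [data]
--     if not isinstance(window, (int, float)):
--         raise ValueError("Window must be a number")
--     w = int(window)
--     if w < 0:
--         raise ValueError("Window must be positive")
--     return [1 + sum(1 for y in data[max(0, i - w):i] if y < x)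
--             for i, x in enumerate(data)]
-- ===== Notes on version B (the rewrite author's own statement) =====
-- stated objective: simpler
-- what changed: B drops the per-index sort-then-.index pass entirely: the rank is computed directly as 1 + the number of strictly smaller elements in the preceding window, in one comprehension.
import Mathlib
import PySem

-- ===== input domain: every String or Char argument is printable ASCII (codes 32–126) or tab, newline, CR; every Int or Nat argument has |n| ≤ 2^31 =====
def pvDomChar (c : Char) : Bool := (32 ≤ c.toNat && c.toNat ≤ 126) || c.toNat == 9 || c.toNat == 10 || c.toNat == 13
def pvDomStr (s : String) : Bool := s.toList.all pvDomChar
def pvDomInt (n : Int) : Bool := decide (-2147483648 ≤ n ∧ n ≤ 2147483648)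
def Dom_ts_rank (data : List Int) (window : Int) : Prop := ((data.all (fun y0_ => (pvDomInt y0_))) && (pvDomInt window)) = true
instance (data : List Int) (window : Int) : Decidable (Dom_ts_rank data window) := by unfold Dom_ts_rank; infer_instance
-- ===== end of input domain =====

-- B replaces A's per-index "sort the window, then .index" by a direct count of strictly
-- smaller elements in the preceding window (simpler; no sort).

-- ===== PORT A =====
def ts_rank (data : List Int) (window : Int) : List Int :=
  -- window = int(window) + 1
  let w := window + 1
  (PySem.List.pyRange 0 (PySem.List.len data) 1).foldl (fun result i =>
    let start := max 0 (i - w + 1)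
    let window_data := PySem.List.slice data (some start) (some (i + 1))
    let sorted_data := PySem.List.sorted window_data (fun x => x) false
    let rank : Int := ((PySem.List.index? sorted_data (PySem.List.pyGetD data i 0)).getD 0 : Int) + 1
    result ++ [rank]) []

-- ===== PORT B =====
def ts_rank_alt (data : List Int) (window : Int) : List Int :=
  let w := window
  (PySem.List.enumerate data 0).map (fun p =>
    -- sum(1 for y in data[max(0, i - w):i] if y < x)  is a count of the matching y
    1 + ((PySem.List.slice data (some (max 0 (p.1 - w))) (some p.1)).countP
          (fun y => decide (y < p.2)) : Int))

-- ===== PRECONDITION & SPEC =====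
-- A raises ValueError ("Window must be positive") exactly when window ≤ -1; B raises there too.
def Pre_ts_rank (data : List Int) (window : Int) : Prop := 0 ≤ window
instance (data : List Int) (window : Int) : Decidable (Pre_ts_rank data window) := by unfold Pre_ts_rank; infer_instance
def pvWitness_ts_rank : List Int × Int := ([1, 2, 3], 2)

def Spec_ts_rank (data : List Int) (window : Int) (out : List Int) : Prop := out = ts_rank_alt data window
instance (data : List Int) (window : Int) (out : List Int) : Decidable (Spec_ts_rank data window out) := by unfold Spec_ts_rank; infer_instance

-- ===== CLAIM (what is proved, stated in full; the proofs are below) =====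
def Claim_equal_ts_rank : Prop := ∀ (data : List Int) (window : Int), Dom_ts_rank data window → Pre_ts_rank data window → Spec_ts_rank data window (ts_rank data window)

-- ===== LEMMAS AND PROOFS =====

-- In a ≤-sorted list containing x, the first index of x is the number of elements < x.
lemma index?_sorted_eq_countP (l : List Int) (x : Int)
    (hs : l.Pairwise (· ≤ ·)) (hx : x ∈ l) :
    PySem.List.index? l x = some (l.countP (fun y => decide (y < x))) := by
  induction l with
  | nil => cases hx
  | cons h t ih =>
    rcases List.pairwise_cons.mp hs with ⟨hle, ht⟩
    by_cases hhx : h = x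
    · subst hhx
      rw [PySem.List.index?_cons_self]
      have h0 : t.countP (fun y => decide (y < h)) = 0 := by
        rw [List.countP_eq_zero]
        intro y hy
        simpa using not_lt.mpr (hle y hy)
      simp [h0]
    · have hxt : x ∈ t := by
        cases hx with
        | head => exact absurd rfl hhx
        | tail _ h' => exact h'
      have hlt : h < x := lt_of_le_of_ne (hle x hxt) hhx
      rw [PySem.List.index?_cons_of_ne t hhx, ih ht hxt]
      simp [hlt]

-- A's rank at index k equals B's count at index k.
lemma rank_pointwise (data : List Int) (window : Int) (hw : 0 ≤ window)
    (k : Nat) (hk : k < data.length) :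
    ((PySem.List.index?
        (PySem.List.sorted
          (PySem.List.slice data (some (max 0 ((k : Int) - (window + 1) + 1))) (some ((k : Int) + 1)))
          (fun x => x) false)
        (PySem.List.pyGetD data (k : Int) 0)).getD 0 : Int) + 1
    = 1 + ((PySem.List.slice data (some (max 0 ((k : Int) - window))) (some (k : Int))).countP
            (fun y => decide (y < PySem.List.pyGetD data (k : Int) 0)) : Int) := by
  have hstart : (k : Int) - (window + 1) + 1 = (k : Int) - window := by ring
  set a : Nat := k - window.toNat with ha
  have hak : a ≤ k := Nat.sub_le _ _
  have hmax : max 0 ((k : Int) - window) = (a : Int) := by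
    by_cases h : window ≤ (k : Int)
    · rw [max_eq_right (by omega)]; omega
    · rw [max_eq_left (by omega)]; omega
  have hx : PySem.List.pyGetD data (k : Int) 0 = data[k] := by
    rw [PySem.List.pyGetD_natCast, List.getD_eq_getElem data 0 hk]
  have hk1 : (k : Int) + 1 = ((k + 1 : Nat) : Int) := by push_cast; ring
  rw [hstart, hmax, hk1, PySem.List.slice_natCast, PySem.List.slice_natCast, hx]
  -- split the window data[a:k+1] = data[a:k] ++ [data[k]]
  have hsplit : List.take (k + 1 - a) (List.drop a data)
      = List.take (k - a) (List.drop a data) ++ [data[k]] := by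
    have h1 : k + 1 - a = (k - a) + 1 := by omega
    rw [h1, List.take_add_one]
    have h2 : (List.drop a data)[k - a]? = some data[k] := by
      rw [List.getElem?_drop]
      have : a + (k - a) = k := by omega
      rw [this, List.getElem?_eq_getElem hk]
    rw [h2]
    rfl
  rw [hsplit]
  set ws := List.take (k - a) (List.drop a data) ++ [data[k]] with hws
  have hmem : data[k] ∈ ws := by simp [hws]
  have hidx : PySem.List.index? (PySem.List.sorted ws (fun x => x) false) data[k]
      = some (ws.countP (fun y => decide (y < data[k]))) := by
    rw [index?_sorted_eq_countP _ _ (PySem.List.sorted_pairwise ws (fun x => x))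
        ((PySem.List.mem_sorted ws (fun x => x) false data[k]).mpr hmem)]
    rw [(PySem.List.sorted_perm ws (fun x => x) false).countP_eq]
  rw [hidx]
  have hcount : ws.countP (fun y => decide (y < data[k]))
      = (List.take (k - a) (List.drop a data)).countP (fun y => decide (y < data[k])) := by
    rw [hws, List.countP_append]
    simp
  rw [hcount]
  simp [Option.getD]
  omega

-- ===== VERDICT (by name: the statement is the Claim_ definition above) =====
theorem ts_rank_spec : Claim_equal_ts_rank := by
  intro data window _ hw
  unfold Spec_ts_rank ts_rank ts_rank_alt
  simp only []
  rw [PySem.List.foldl_append_singleton_eq_map, List.nil_append,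
      PySem.List.enumerate_eq_map_pyRange data 0, List.map_map,
      PySem.List.len_eq, PySem.List.pyRange_zero_natCast, List.map_map, List.map_map]
  apply List.map_congr_left
  intro k hkmem
  have hk : k < data.length := List.mem_range.mp hkmem
  simpa using rank_pointwise data window hw k hk
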